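-- pv_equiv track=rewrite | github.com/Aceee03/med-rag | dsm_markdown_filter.py | find_section_window
-- ===== SOURCE A (Python) =====
-- from typing import Any
--
-- SECTION_III_MARKERS = (
--     "section iii",
--     "emerging measures and models",
-- )
--
-- def find_section_window(sections: list[dict[str, Any]]) -> tuple[int | None, int | None]:
--     section_ii_index: int | None = None
--     section_iii_index: int | None = None
--
--     for index, section in enumerate(sections):
--         normalized = section["normalized_header"]
--         if section_ii_index is None and normalized == "section ii":
--             section_ii_index = index
--             continue
--
--         if section_ii_index is not None and normalized == "section iii":
--             section_iii_index = index
--             break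
--
--     if section_ii_index is None:
--         for index, section in enumerate(sections):
--             if section["normalized_header"] == "section ii diagnostic criteria and codes":
--                 section_ii_index = index
--                 break
--
--     if section_ii_index is not None and section_iii_index is None:
--         for index in range(section_ii_index + 1, len(sections)):
--             normalized = sections[index]["normalized_header"]
--             if any(marker in normalized for marker in SECTION_III_MARKERS):
--                 section_iii_index = index
--                 break
--
--     return section_ii_index, section_iii_index
-- ===== SOURCE B (Python) =====
-- SECTION_III_MARKERS = (
--     "section iii",
--     "emerging measures and models",
-- )
--
-- def find_section_window(sections):
--     # Classify every header into candidate-index buckets in one pass,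
--     # then answer by taking minima over (filtered) buckets.
--     exact_ii, fallback_ii, exact_iii, marker_iii = [], [], [], []
--     for index, section in enumerate(sections):
--         h = section["normalized_header"]
--         if h == "section ii":
--             exact_ii.append(index)
--         if h == "section ii diagnostic criteria and codes":
--             fallback_ii.append(index)
--         if h == "section iii":
--             exact_iii.append(index)
--         if any(marker in h for marker in SECTION_III_MARKERS):
--             marker_iii.append(index)
--
--     ii = min(exact_ii, default=None)
--     # an exact 'section iii' only pairs with an exact 'section ii'
--     first_choices = exact_iii if ii is not None else []
--     if ii is None:
--         ii = min(fallback_ii, default=None)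
--     if ii is None:
--         return None, None
--     iii = min((j for j in first_choices if j > ii), default=None)
--     if iii is None:
--         iii = min((j for j in marker_iii if j > ii), default=None)
--     return ii, iii
-- ===== Notes on version B (the rewrite author's own statement) =====
-- stated objective: alternative
-- what changed: A's interleaved first-match scan with mutable ii/iii state plus two conditional rescans is replaced by a bucket classification: one pass collects ALL candidate indices into four lists (exact ii, fallback ii, exact iii, marker iii), and the answer is computed by minima over (filtered) buckets instead of any first-match scanning. Pre_ requires every section dict to carry the 'normalized_header' key: B reads all headers and raises KeyError on a key-less section even where A's early break skips it.
import Mathlib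
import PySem

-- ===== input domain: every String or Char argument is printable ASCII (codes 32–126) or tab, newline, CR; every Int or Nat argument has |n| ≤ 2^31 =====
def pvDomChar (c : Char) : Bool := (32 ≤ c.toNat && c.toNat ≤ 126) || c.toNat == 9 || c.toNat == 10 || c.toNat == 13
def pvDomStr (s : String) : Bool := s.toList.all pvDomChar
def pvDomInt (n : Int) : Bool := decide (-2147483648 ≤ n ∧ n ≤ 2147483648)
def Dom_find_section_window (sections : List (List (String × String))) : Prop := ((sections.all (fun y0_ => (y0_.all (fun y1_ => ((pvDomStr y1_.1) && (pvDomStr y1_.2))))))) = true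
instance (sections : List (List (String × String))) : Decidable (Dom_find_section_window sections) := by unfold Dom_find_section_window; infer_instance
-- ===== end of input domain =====

-- B replaces A's interleaved first-match scans by one bucket-classification pass plus minima over filtered candidate-index lists; objective: alternative.


-- ===== PORT A =====
-- section["normalized_header"]: first-match association-list lookup; Pre_ guarantees the key is present, so the "" default is never used
def pvHdr (sec : List (String × String)) : String :=
  ((sec.find? (fun p => p.1 == "normalized_header")).map Prod.snd).getD ""

-- first for-loop: enumerate with mutable section_ii_index state, break on "section iii"
def pvALoop1 : List (List (String × String)) → Int → Option Int → Option Int × Option Int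
  | [], _, ii => (ii, none)
  | sec :: rest, idx, ii =>
    let normalized := pvHdr sec
    if ii = none ∧ normalized == "section ii" then
      pvALoop1 rest (idx + 1) (some idx)
    else if ii ≠ none ∧ normalized == "section iii" then
      (ii, some idx)
    else
      pvALoop1 rest (idx + 1) ii

-- second for-loop: fallback scan for the long section-II header, break on first hit
def pvALoop2 : List (List (String × String)) → Int → Option Int
  | [], _ => none
  | sec :: rest, idx =>
    if pvHdr sec == "section ii diagnostic criteria and codes" then some idx
    else pvALoop2 rest (idx + 1)

-- third for-loop: 'for index in range(section_ii_index + 1, len(sections))', any marker substring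
def pvALoop3 (sections : List (List (String × String))) : List Int → Option Int
  | [] => none
  | idx :: rest =>
    let normalized := pvHdr (PySem.List.pyGetD sections idx [])  -- index always in range here
    if PySem.Str.isIn "section iii" normalized || PySem.Str.isIn "emerging measures and models" normalized then
      some idx
    else pvALoop3 sections rest

def find_section_window (sections : List (List (String × String))) : Option Int × Option Int :=
  let r := pvALoop1 sections 0 none
  let ii0 := r.1
  let iii0 := r.2
  let ii := if ii0 = none then pvALoop2 sections 0 else ii0
  let iii :=
    match ii, iii0 with
    | some i, none => pvALoop3 sections (PySem.List.pyRange (i + 1) (sections.length : Int) 1)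
    | _, _ => iii0
  (ii, iii)

-- ===== PORT B =====
-- any(marker in h for marker in SECTION_III_MARKERS)
def pvBMarker (h : String) : Bool :=
  PySem.Str.isIn "section iii" h || PySem.Str.isIn "emerging measures and models" h

-- B's single classification loop: collect ALL candidate indices into the four buckets
-- (exact_ii, fallback_ii, exact_iii, marker_iii), in index order
def pvCollect : List (List (String × String)) → Int → List Int × List Int × List Int × List Int
  | [], _ => ([], [], [], [])
  | sec :: rest, idx =>
    let h := pvHdr sec
    let r := pvCollect rest (idx + 1)
    ( if h == "section ii" then idx :: r.1 else r.1,
      if h == "section ii diagnostic criteria and codes" then idx :: r.2.1 else r.2.1,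
      if h == "section iii" then idx :: r.2.2.1 else r.2.2.1,
      if pvBMarker h then idx :: r.2.2.2 else r.2.2.2 )

def find_section_window_alt (sections : List (List (String × String))) : Option Int × Option Int :=
  let b := pvCollect sections 0
  let iiExact := PySem.List.min? b.1 (fun j => j)
  let firstChoices := if iiExact.isSome then b.2.2.1 else []
  let ii :=
    match iiExact with
    | some i => some i
    | none => PySem.List.min? b.2.1 (fun j => j)
  match ii with
  | none => (none, none)
  | some i =>
    let iii0 := PySem.List.min? (firstChoices.filter (fun j => decide (i < j))) (fun j => j)
    let iii :=
      match iii0 with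
      | some j => some j
      | none => PySem.List.min? (b.2.2.2.filter (fun j => decide (i < j))) (fun j => j)
    (some i, iii)

-- ===== PRECONDITION & SPEC =====
-- Pre_ excludes sections missing the 'normalized_header' key: Python A (and B) raise KeyError on any such
-- section they read; B reads all of them up front, so it raises even where A's early break skips one.
def Pre_find_section_window (sections : List (List (String × String))) : Prop :=
  (sections.all (fun sec => sec.any (fun p => p.1 == "normalized_header"))) = true
instance (sections : List (List (String × String))) : Decidable (Pre_find_section_window sections) := by unfold Pre_find_section_window; infer_instance
def pvWitness_find_section_window : (List (List (String × String))) :=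
  [[("normalized_header", "section ii")], [("normalized_header", "emerging measures and models")]]

def Spec_find_section_window (sections : List (List (String × String))) (out : Option Int × Option Int) : Prop := out = find_section_window_alt sections
instance (sections : List (List (String × String))) (out : Option Int × Option Int) : Decidable (Spec_find_section_window sections out) := by unfold Spec_find_section_window; infer_instance

-- ===== CLAIM (what is proved, stated in full; the proofs are below) =====
def Claim_equal_find_section_window : Prop := ∀ (sections : List (List (String × String))), Dom_find_section_window sections → Pre_find_section_window sections → Spec_find_section_window sections (find_section_window sections)

-- ===== LEMMAS AND PROOFS =====

-- proof-only: first index (counting from the given offset) whose header satisfies p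
def pvBFind (p : String → Bool) : List String → Int → Option Int
  | [], _ => none
  | h :: rest, i => if p h then some i else pvBFind p rest (i + 1)

-- proof-only: generic bucket collector; each pvCollect component is one instance of it
def pvColl (p : String → Bool) : List String → Int → List Int
  | [], _ => []
  | h :: rest, i => if p h then i :: pvColl p rest (i + 1) else pvColl p rest (i + 1)

theorem pvCollect_eq : ∀ (secs : List (List (String × String))) (k : Int),
    pvCollect secs k =
      ( pvColl (fun h => h == "section ii") (secs.map pvHdr) k,
        pvColl (fun h => h == "section ii diagnostic criteria and codes") (secs.map pvHdr) k,
        pvColl (fun h => h == "section iii") (secs.map pvHdr) k,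
        pvColl pvBMarker (secs.map pvHdr) k ) := by
  intro secs
  induction secs with
  | nil => intro k; rfl
  | cons sec rest ih => intro k; simp [pvCollect, pvColl, ih]

theorem pvBFind_le (p : String → Bool) : ∀ (hs : List String) (k i : Int),
    pvBFind p hs k = some i → k ≤ i := by
  intro hs
  induction hs with
  | nil => intro k i h; simp [pvBFind] at h
  | cons h t ih =>
    intro k i hk
    simp only [pvBFind] at hk
    split at hk
    · cases hk; omega
    · have := ih (k + 1) i hk; omega

theorem pvColl_bound (p : String → Bool) : ∀ (hs : List String) (k j : Int),
    j ∈ pvColl p hs k → k ≤ j := by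
  intro hs
  induction hs with
  | nil => intro k j h; simp [pvColl] at h
  | cons h t ih =>
    intro k j hk
    simp only [pvColl] at hk
    split at hk
    · rcases List.mem_cons.mp hk with h | h
      · omega
      · have := ih (k + 1) j h; omega
    · have := ih (k + 1) j hk; omega

theorem min?_cons_of_lb (k : Int) (l : List Int) (h : ∀ j ∈ l, k ≤ j) :
    PySem.List.min? (k :: l) (fun j => j) = some k := by
  rw [PySem.List.min?_id_cons]
  congr 1
  induction l generalizing k with
  | nil => rfl
  | cons a t ih =>
    have hk : min k a = k := by
      have := h a (List.mem_cons_self)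
      omega
    simp only [List.foldl, hk]
    exact ih k (fun j hj => h j (List.mem_cons_of_mem _ hj))

theorem pvColl_min (p : String → Bool) : ∀ (hs : List String) (k : Int),
    PySem.List.min? (pvColl p hs k) (fun j => j) = pvBFind p hs k := by
  intro hs
  induction hs with
  | nil => intro k; rfl
  | cons h t ih =>
    intro k
    simp only [pvColl, pvBFind]
    split
    · exact min?_cons_of_lb k _ (fun j hj => by have := pvColl_bound p t (k + 1) j hj; omega)
    · exact ih (k + 1)

theorem pvColl_filter_id (p : String → Bool) (hs : List String) (k t : Int) (hkt : t < k) :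
    (pvColl p hs k).filter (fun j => decide (t < j)) = pvColl p hs k := by
  apply List.filter_eq_self.mpr
  intro j hj
  have := pvColl_bound p hs k j hj
  simp; omega

theorem pvColl_filter_min (p : String → Bool) : ∀ (hs : List String) (k t : Int), k ≤ t + 1 →
    PySem.List.min? ((pvColl p hs k).filter (fun j => decide (t < j))) (fun j => j)
      = pvBFind p (hs.drop (t + 1 - k).toNat) (t + 1) := by
  intro hs
  induction hs with
  | nil => intro k t _; simp [pvColl, pvBFind]
  | cons h rest ih =>
    intro k t hkt
    by_cases hk : k = t + 1
    · subst hk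
      simp only [pvColl]
      have h0 : (t + 1 - (t + 1)).toNat = 0 := by omega
      rw [h0, List.drop_zero]
      simp only [pvBFind]
      split
      · rw [List.filter_cons_of_pos (by simp)]
        exact min?_cons_of_lb _ _ (fun j hj => by
          have := pvColl_bound p rest (t + 1 + 1) j ((List.mem_filter.mp hj).1); omega)
      · rw [pvColl_filter_id p rest (t + 1 + 1) t (by omega)]
        rw [pvColl_min]
    · have hlt : k ≤ t := by omega
      simp only [pvColl]
      have hd : (h :: rest).drop (t + 1 - k).toNat = rest.drop (t + 1 - (k + 1)).toNat := by
        have : (t + 1 - k).toNat = (t + 1 - (k + 1)).toNat + 1 := by omega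
        rw [this, List.drop_succ_cons]
      rw [hd]
      split
      · rw [List.filter_cons_of_neg (by simp; omega)]
        exact ih (k + 1) t (by omega)
      · exact ih (k + 1) t (by omega)

theorem pvALoop1_some : ∀ (secs : List (List (String × String))) (k i : Int),
    pvALoop1 secs k (some i) = (some i, pvBFind (fun h => h == "section iii") (secs.map pvHdr) k) := by
  intro secs
  induction secs with
  | nil => intro k i; simp [pvALoop1, pvBFind]
  | cons sec rest ih =>
    intro k i
    simp only [pvALoop1, pvBFind, List.map]
    by_cases hm : (pvHdr sec == "section iii") = true
    · simp [hm]
    · simp [hm, ih]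

theorem pvALoop1_none : ∀ (secs : List (List (String × String))) (k : Int),
    pvALoop1 secs k none =
      match pvBFind (fun h => h == "section ii") (secs.map pvHdr) k with
      | none => (none, none)
      | some i => (some i, pvBFind (fun h => h == "section iii") ((secs.map pvHdr).drop ((i - k).toNat + 1)) (i + 1)) := by
  intro secs
  induction secs with
  | nil => intro k; simp [pvALoop1, pvBFind]
  | cons sec rest ih =>
    intro k
    simp only [pvALoop1, pvBFind, List.map]
    by_cases h2 : (pvHdr sec == "section ii") = true
    · rw [if_pos ⟨by trivial, h2⟩, pvALoop1_some, if_pos h2]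
      simp
    · rw [if_neg (fun h => h2 h.2), if_neg (fun h => h.1 rfl), ih (k + 1), if_neg h2]
      cases hf : pvBFind (fun h => h == "section ii") (rest.map pvHdr) (k + 1) with
      | none => simp
      | some i =>
        have hle := pvBFind_le _ _ _ _ hf
        have hnn : (i - k).toNat = (i - (k + 1)).toNat + 1 := by omega
        simp [hnn]

theorem pvALoop2_eq : ∀ (secs : List (List (String × String))) (k : Int),
    pvALoop2 secs k = pvBFind (fun h => h == "section ii diagnostic criteria and codes") (secs.map pvHdr) k := by
  intro secs
  induction secs with
  | nil => intro k; rfl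
  | cons sec rest ih =>
    intro k
    simp only [pvALoop2, pvBFind, List.map]
    split <;> simp_all

theorem pvALoop3_eq (secs : List (List (String × String))) :
    ∀ (fuel : Nat) (a : Int), 0 ≤ a → (secs.length - a.toNat) ≤ fuel →
    pvALoop3 secs (PySem.List.pyRange a (secs.length : Int) 1) =
      pvBFind pvBMarker ((secs.map pvHdr).drop a.toNat) a := by
  intro fuel
  induction fuel with
  | zero =>
    intro a ha hfuel
    have hge : (secs.length : Int) ≤ a := by omega
    rw [PySem.List.pyRange_one_eq_nil hge]
    have : (secs.map pvHdr).drop a.toNat = [] := by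
      apply List.drop_eq_nil_of_le; simp; omega
    simp [this, pvALoop3, pvBFind]
  | succ n ih =>
    intro a ha hfuel
    by_cases hlt : a < (secs.length : Int)
    · rw [PySem.List.pyRange_one_cons hlt]
      have hidx : a.toNat < secs.length := by omega
      have hidx' : a.toNat < (secs.map pvHdr).length := by simpa using hidx
      have hget : PySem.List.pyGetD secs a [] = secs[a.toNat] :=
        PySem.List.pyGetD_eq_getElem secs [] ha (by exact_mod_cast hlt)
      have hdrop : (secs.map pvHdr).drop a.toNat = pvHdr secs[a.toNat] :: (secs.map pvHdr).drop (a.toNat + 1) := by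
        rw [List.drop_eq_getElem_cons hidx']
        simp
      rw [hdrop]
      simp only [pvALoop3, pvBFind, hget]
      by_cases hm : (PySem.Str.isIn "section iii" (pvHdr secs[a.toNat]) || PySem.Str.isIn "emerging measures and models" (pvHdr secs[a.toNat])) = true
      · rw [if_pos hm, if_pos (show pvBMarker (pvHdr secs[a.toNat]) = true from hm)]
      · rw [if_neg hm, if_neg (show ¬ pvBMarker (pvHdr secs[a.toNat]) = true from hm)]
        have h1 : (a + 1).toNat = a.toNat + 1 := by omega
        rw [← h1]
        exact ih (a + 1) (by omega) (by omega)
    · rw [PySem.List.pyRange_one_eq_nil (by omega)]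
      have : (secs.map pvHdr).drop a.toNat = [] := by
        apply List.drop_eq_nil_of_le; simp; omega
      simp [this, pvALoop3, pvBFind]

-- ===== VERDICT (by name: the statement is the Claim_ definition above) =====
theorem find_section_window_spec : Claim_equal_find_section_window := by
  intro sections _ _
  unfold Spec_find_section_window find_section_window find_section_window_alt
  rw [pvALoop1_none, pvCollect_eq]
  cases hE : pvBFind (fun h => h == "section ii") (sections.map pvHdr) 0 with
  | none =>
    rw [pvALoop2_eq]
    have hE' : PySem.List.min? (pvColl (fun h => h == "section ii") (sections.map pvHdr) 0) (fun j => j) = none := by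
      rw [pvColl_min]; exact hE
    cases hC : pvBFind (fun h => h == "section ii diagnostic criteria and codes") (sections.map pvHdr) 0 with
    | none =>
      have hC' := (pvColl_min (fun h => h == "section ii diagnostic criteria and codes") (sections.map pvHdr) 0).trans hC
      simp [hE', hC']
    | some i =>
      have hC' := (pvColl_min (fun h => h == "section ii diagnostic criteria and codes") (sections.map pvHdr) 0).trans hC
      have hi : (0 : Int) ≤ i := pvBFind_le _ _ _ _ hC
      have hL3 := pvALoop3_eq sections (sections.length) (i + 1) (by omega) (by omega)
      have hF := pvColl_filter_min pvBMarker (sections.map pvHdr) 0 i (by omega)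
      have h1 : (i + 1 - 0).toNat = (i + 1).toNat := by omega
      rw [h1] at hF
      have hnil : PySem.List.min? ([] : List Int) (fun j => j) = none := rfl
      simp [hE', hC', hL3, hF, hnil]
  | some i =>
    have hE' : PySem.List.min? (pvColl (fun h => h == "section ii") (sections.map pvHdr) 0) (fun j => j) = some i := by
      rw [pvColl_min]; exact hE
    have hi : (0 : Int) ≤ i := pvBFind_le _ _ _ _ hE
    have hL3 := pvALoop3_eq sections (sections.length) (i + 1) (by omega) (by omega)
    have hF3 := pvColl_filter_min (fun h => h == "section iii") (sections.map pvHdr) 0 i (by omega)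
    have hFM := pvColl_filter_min pvBMarker (sections.map pvHdr) 0 i (by omega)
    have h1 : (i + 1 - 0).toNat = i.toNat + 1 := by omega
    rw [h1] at hF3 hFM
    have h3 : (i + 1).toNat = i.toNat + 1 := by omega
    rw [h3] at hL3
    cases hI : pvBFind (fun h => h == "section iii") ((sections.map pvHdr).drop (i.toNat + 1)) (i + 1) with
    | some j =>
      rw [hI] at hF3
      simp [hE', hF3, hI]
    | none =>
      rw [hI] at hF3
      simp [hE', hF3, hI, hFM, hL3]
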